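-- pv_equiv track=rewrite | github.com/ryan-heslin/Advent_of_Code_2019 | solutions/day22.py | pow_compose
-- ===== SOURCE A (Python) =====
-- def multiply_congruences(x, y, modulus):
--     a = (x[0] * y[0]) % modulus
--     b = (x[1] * y[0] + y[1]) % modulus
--     return (a, b)
--
-- def pow_compose(f, k, modulus):
--     result = (1, 0)
--     while k > 0:
--         if k % 2 != 0:
--             result = multiply_congruences(result, f, modulus)
--         k //= 2
--         f = multiply_congruences(f, f, modulus)
--     return result
-- ===== SOURCE B (Python) =====
-- def multiply_congruences(x, y, modulus):
--     a = (x[0] * y[0]) % modulus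
--     b = (x[1] * y[0] + y[1]) % modulus
--     return (a, b)
--
-- def pow_compose(f, k, modulus):
--     if k <= 0:
--         return (1, 0)
--     half = pow_compose(f, k // 2, modulus)
--     sq = multiply_congruences(half, half, modulus)
--     if k % 2:
--         return multiply_congruences(sq, f, modulus)
--     return sq
-- ===== Notes on version B (the rewrite author's own statement) =====
-- stated objective: alternative
-- what changed: Replaces the iterative low-to-high bit loop that repeatedly squares f and multiplies oddness hits into an accumulator with top-down recursion on k//2 that squares the recursive result and composes f once when k is odd (no accumulator, no mutated f).
import Mathlib
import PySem

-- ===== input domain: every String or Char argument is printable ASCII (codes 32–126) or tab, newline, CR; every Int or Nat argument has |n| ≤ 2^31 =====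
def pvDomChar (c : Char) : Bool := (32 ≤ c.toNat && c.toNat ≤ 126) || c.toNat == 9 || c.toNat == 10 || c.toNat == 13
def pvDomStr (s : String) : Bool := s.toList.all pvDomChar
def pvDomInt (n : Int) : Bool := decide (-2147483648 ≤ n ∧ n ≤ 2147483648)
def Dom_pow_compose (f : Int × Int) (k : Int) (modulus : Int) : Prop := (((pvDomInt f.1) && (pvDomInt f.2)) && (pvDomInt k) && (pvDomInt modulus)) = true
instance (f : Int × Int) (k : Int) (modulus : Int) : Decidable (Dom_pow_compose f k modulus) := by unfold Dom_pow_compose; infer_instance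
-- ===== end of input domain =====

-- B replaces A's iterative bit loop (accumulator + repeated squaring of f) by top-down
-- recursion on k // 2 (square the recursive result, compose f once when k is odd): an
-- alternative decomposition of the same cost.

-- ===== PORT A =====
-- shared helper: Python's multiply_congruences (defined identically in Source A and Source B).
-- PySem.Int.mod is Python's %; Python raises ZeroDivisionError for modulus = 0, which
-- Pre_pow_compose excludes whenever the helper is actually reached (k > 0).
def multiply_congruences (x y : Int × Int) (modulus : Int) : Int × Int :=
  (PySem.Int.mod (x.1 * y.1) modulus, PySem.Int.mod (x.2 * y.1 + y.2) modulus)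

-- A's while-loop: state (result, f, k)
def powLoopA (result f : Int × Int) (k : Int) (modulus : Int) : Int × Int :=
  if _h : 0 < k then
    powLoopA (if PySem.Int.mod k 2 ≠ 0 then multiply_congruences result f modulus else result)
      (multiply_congruences f f modulus) (PySem.Int.floordiv k 2) modulus
  else result
termination_by k.toNat
decreasing_by
  rw [PySem.Int.floordiv_eq_ediv_of_pos (by omega : (0:Int) < 2)]
  omega

def pow_compose (f : Int × Int) (k : Int) (modulus : Int) : Int × Int :=
  powLoopA (1, 0) f k modulus

-- ===== PORT B =====
def pow_compose_alt (f : Int × Int) (k : Int) (modulus : Int) : Int × Int :=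
  if _h : k ≤ 0 then (1, 0)
  else
    let half := pow_compose_alt f (PySem.Int.floordiv k 2) modulus
    let sq := multiply_congruences half half modulus
    if PySem.Int.mod k 2 ≠ 0 then multiply_congruences sq f modulus else sq
termination_by k.toNat
decreasing_by
  rw [PySem.Int.floordiv_eq_ediv_of_pos (by omega : (0:Int) < 2)]
  omega

-- ===== PRECONDITION & SPEC =====
-- Pre_ excludes exactly the inputs where Python A raises: with k > 0 the first
-- '% modulus' is evaluated, so modulus = 0 gives ZeroDivisionError (B raises there too).
def Pre_pow_compose (f : Int × Int) (k : Int) (modulus : Int) : Prop :=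
  k ≤ 0 ∨ modulus ≠ 0
instance (f : Int × Int) (k : Int) (modulus : Int) : Decidable (Pre_pow_compose f k modulus) := by
  unfold Pre_pow_compose; infer_instance

def pvWitness_pow_compose : (Int × Int) × Int × Int := ((2, 3), 5, 7)

def Spec_pow_compose (f : Int × Int) (k : Int) (modulus : Int) (out : Int × Int) : Prop := out = pow_compose_alt f k modulus
instance (f : Int × Int) (k : Int) (modulus : Int) (out : Int × Int) : Decidable (Spec_pow_compose f k modulus out) := by unfold Spec_pow_compose; infer_instance

-- ===== CLAIM (what is proved, stated in full; the proofs are below) =====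
def Claim_equal_pow_compose : Prop := ∀ (f : Int × Int) (k : Int) (modulus : Int), Dom_pow_compose f k modulus → Pre_pow_compose f k modulus → Spec_pow_compose f k modulus (pow_compose f k modulus)

-- ===== LEMMAS AND PROOFS =====

-- componentwise Python-mod of a pair
def modp (x : Int × Int) (m : Int) : Int × Int :=
  (PySem.Int.mod x.1 m, PySem.Int.mod x.2 m)

-- canonical power chain: pw g m n = g composed with itself n times, left-associated
def pw (g : Int × Int) (m : Int) : Nat → Int × Int
  | 0 => (1, 0)
  | n + 1 => multiply_congruences (pw g m n) g m

theorem mod_eq_fmod (a b : Int) : PySem.Int.mod a b = Int.fmod a b := rfl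

theorem fmod_mul_left (a b m : Int) : (a.fmod m * b).fmod m = (a * b).fmod m := by
  conv_rhs => rw [Int.mul_fmod]
  rw [Int.mul_fmod (a.fmod m), Int.fmod_fmod]

theorem fmod_mul_right (a b m : Int) : (a * b.fmod m).fmod m = (a * b).fmod m := by
  conv_rhs => rw [Int.mul_fmod]
  rw [Int.mul_fmod a (b.fmod m), Int.fmod_fmod]

theorem fmod_add_congr {a a' : Int} (m b : Int) (h : a.fmod m = a'.fmod m) :
    (a + b).fmod m = (a' + b).fmod m := by
  rw [Int.add_fmod, h, ← Int.add_fmod]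

theorem fmod_add_right (a b m : Int) : (a + b.fmod m).fmod m = (a + b).fmod m := by
  conv_rhs => rw [Int.add_fmod]
  rw [Int.add_fmod a (b.fmod m), Int.fmod_fmod]

theorem modp_idem (x : Int × Int) (m : Int) : modp (modp x m) m = modp x m := by
  simp [modp, mod_eq_fmod]

theorem mulc_reduced (x y : Int × Int) (m : Int) :
    modp (multiply_congruences x y m) m = multiply_congruences x y m := by
  simp [modp, multiply_congruences, mod_eq_fmod]

theorem mulc_congr {x x' y y' : Int × Int} (m : Int)
    (hx : modp x m = modp x' m) (hy : modp y m = modp y' m) :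
    multiply_congruences x y m = multiply_congruences x' y' m := by
  have hx1 : Int.fmod x.1 m = Int.fmod x'.1 m := congrArg Prod.fst hx
  have hx2 : Int.fmod x.2 m = Int.fmod x'.2 m := congrArg Prod.snd hx
  have hy1 : Int.fmod y.1 m = Int.fmod y'.1 m := congrArg Prod.fst hy
  have hy2 : Int.fmod y.2 m = Int.fmod y'.2 m := congrArg Prod.snd hy
  simp only [multiply_congruences, mod_eq_fmod, Prod.mk.injEq]
  constructor
  · rw [Int.mul_fmod, hx1, hy1, ← Int.mul_fmod]
  · rw [Int.add_fmod, Int.mul_fmod, hx2, hy1, hy2, ← Int.mul_fmod, ← Int.add_fmod]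

theorem mulc_assoc (x y z : Int × Int) (m : Int) :
    multiply_congruences (multiply_congruences x y m) z m
      = multiply_congruences x (multiply_congruences y z m) m := by
  simp only [multiply_congruences, mod_eq_fmod, Prod.mk.injEq]
  constructor
  · rw [fmod_mul_left, fmod_mul_right, mul_assoc]
  · rw [fmod_add_congr m z.2 (fmod_mul_left (x.2 * y.1 + y.2) z.1 m),
      fmod_add_right, fmod_add_congr m (y.2 * z.1 + z.2) (fmod_mul_right x.2 (y.1 * z.1) m)]
    ring_nf

theorem pw_one_eq_modp (g : Int × Int) (m : Int) : pw g m 1 = modp g m := by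
  simp [pw, multiply_congruences, modp]

theorem pw_reduced (g : Int × Int) (m : Int) (n : Nat) (hn : 0 < n) :
    modp (pw g m n) m = pw g m n := by
  cases n with
  | zero => omega
  | succ n => exact mulc_reduced _ _ _

-- composing two canonical powers gives the reduced canonical power of the sum
theorem mulc_pw_pw (g : Int × Int) (m : Int) (n q : Nat) :
    multiply_congruences (pw g m n) (pw g m q) m = modp (pw g m (n + q)) m := by
  induction q with
  | zero => simp [pw, multiply_congruences, modp]
  | succ q ih =>
    calc multiply_congruences (pw g m n) (multiply_congruences (pw g m q) g m) m
        = multiply_congruences (multiply_congruences (pw g m n) (pw g m q) m) g m :=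
          (mulc_assoc _ _ _ _).symm
      _ = multiply_congruences (pw g m (n + q)) g m :=
          mulc_congr m (by rw [ih, modp_idem]) rfl
      _ = pw g m (n + q + 1) := rfl
      _ = modp (pw g m (n + (q + 1))) m := (pw_reduced g m (n + q + 1) (by omega)).symm

-- powers of the squared base agree (mod m) with doubled powers of the base
theorem pw_sq (g : Int × Int) (m : Int) (j : Nat) :
    modp (pw (multiply_congruences g g m) m j) m = modp (pw g m (2 * j)) m := by
  induction j with
  | zero => rfl
  | succ j ih =>
    have h2 : pw g m (2 * j + 2)
        = multiply_congruences (pw g m (2 * j)) (multiply_congruences g g m) m := by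
      calc pw g m (2 * j + 2)
          = multiply_congruences (multiply_congruences (pw g m (2 * j)) g m) g m := rfl
        _ = _ := mulc_assoc _ _ _ _
    calc modp (pw (multiply_congruences g g m) m (j + 1)) m
        = multiply_congruences (pw (multiply_congruences g g m) m j) (multiply_congruences g g m) m :=
          pw_reduced _ m (j + 1) (by omega)
      _ = multiply_congruences (pw g m (2 * j)) (multiply_congruences g g m) m :=
          mulc_congr m ih rfl
      _ = pw g m (2 * j + 2) := h2.symm
      _ = modp (pw g m (2 * (j + 1))) m := by
          rw [show 2 * (j + 1) = 2 * j + 2 by ring, pw_reduced g m (2 * j + 2) (by omega)]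

-- the base composed with a canonical power: exactly the next canonical power
theorem mulc_base_pw (g : Int × Int) (m : Int) (n : Nat) :
    multiply_congruences g (pw g m n) m = pw g m (n + 1) := by
  rw [mulc_congr m (x' := pw g m 1) (y' := pw g m n)
      (by rw [pw_one_eq_modp, modp_idem]) rfl,
    mulc_pw_pw, Nat.add_comm 1 n, pw_reduced g m (n + 1) (by omega)]

-- A's loop computes: accumulator composed with the canonical power of the base
theorem powLoopA_eq (m : Int) : ∀ (n : Nat) (k : Int), 0 < k → k.toNat = n →
    ∀ (r g : Int × Int), powLoopA r g k m = multiply_congruences r (pw g m n) m := by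
  intro n
  induction n using Nat.strong_induction_on with
  | _ n ih =>
    intro k hk hkn r g
    rw [powLoopA, dif_pos hk, PySem.Int.floordiv_eq_ediv_of_pos (by omega : (0:Int) < 2),
      PySem.Int.mod_eq_emod_of_pos (by omega : (0:Int) < 2)]
    by_cases h1 : k = 1
    · subst h1
      have hn1 : n = 1 := by omega
      subst hn1
      rw [powLoopA, dif_neg (by norm_num : ¬ (0:Int) < 1 / 2)]
      norm_num
      rw [pw_one_eq_modp]
      exact mulc_congr m rfl (modp_idem g m).symm
    · have hj : 0 < k / 2 := by omega
      have hjn : (k / 2).toNat < n := by omega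
      rw [ih (k / 2).toNat hjn (k / 2) hj rfl]
      by_cases he : k % 2 = 0
      · simp only [he, ne_eq, not_true_eq_false, if_false]
        refine mulc_congr m rfl ?_
        rw [show n = 2 * (k / 2).toNat by omega]
        exact pw_sq g m (k / 2).toNat
      · simp only [he, ne_eq, not_false_eq_true, if_true]
        rw [mulc_congr m (x' := multiply_congruences r g m) (y' := pw g m (2 * (k / 2).toNat))
            rfl (pw_sq g m (k / 2).toNat),
          mulc_assoc, mulc_base_pw, show 2 * (k / 2).toNat + 1 = n by omega]

-- B's recursion computes the reduced canonical power
theorem alt_eq (m : Int) : ∀ (n : Nat) (k : Int), 0 < k → k.toNat = n →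
    ∀ (g : Int × Int), pow_compose_alt g k m = modp (pw g m n) m := by
  intro n
  induction n using Nat.strong_induction_on with
  | _ n ih =>
    intro k hk hkn g
    rw [pow_compose_alt, dif_neg (by omega : ¬ k ≤ 0)]
    dsimp only
    rw [PySem.Int.floordiv_eq_ediv_of_pos (by omega : (0:Int) < 2),
      PySem.Int.mod_eq_emod_of_pos (by omega : (0:Int) < 2)]
    by_cases h1 : k = 1
    · subst h1
      have hn1 : n = 1 := by omega
      subst hn1
      rw [pow_compose_alt, dif_pos (by norm_num : (1:Int) / 2 ≤ 0)]
      norm_num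
      calc multiply_congruences (multiply_congruences (1, 0) (1, 0) m) g m
          = multiply_congruences (1, 0) g m :=
            mulc_congr m (by simp [multiply_congruences, modp, mod_eq_fmod, Int.fmod_fmod]) rfl
        _ = pw g m 1 := rfl
        _ = modp (pw g m 1) m := (pw_reduced g m 1 (by omega)).symm
    · have hj : 0 < k / 2 := by omega
      have hjn : (k / 2).toNat < n := by omega
      rw [ih (k / 2).toNat hjn (k / 2) hj rfl, pw_reduced g m (k / 2).toNat (by omega),
        mulc_pw_pw, show (k / 2).toNat + (k / 2).toNat = 2 * (k / 2).toNat by ring,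
        pw_reduced g m (2 * (k / 2).toNat) (by omega)]
      by_cases he : k % 2 = 0
      · simp only [he, ne_eq, not_true_eq_false, if_false]
        rw [show n = 2 * (k / 2).toNat by omega]
        exact (pw_reduced g m (2 * (k / 2).toNat) (by omega)).symm
      · simp only [he, ne_eq, not_false_eq_true, if_true]
        calc multiply_congruences (pw g m (2 * (k / 2).toNat)) g m
            = pw g m (2 * (k / 2).toNat + 1) := rfl
          _ = modp (pw g m n) m := by
              rw [show n = 2 * (k / 2).toNat + 1 by omega,
                pw_reduced g m (2 * (k / 2).toNat + 1) (by omega)]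

theorem mulc_one_zero (x : Int × Int) (m : Int) :
    multiply_congruences (1, 0) x m = modp x m := by
  simp [multiply_congruences, modp]

-- ===== VERDICT (by name: the statement is the Claim_ definition above) =====
theorem pow_compose_spec : Claim_equal_pow_compose := by
  intro f k modulus _ _
  unfold Spec_pow_compose pow_compose
  by_cases hk : 0 < k
  · rw [powLoopA_eq modulus k.toNat k hk rfl, mulc_one_zero,
      alt_eq modulus k.toNat k hk rfl]
  · rw [powLoopA, dif_neg hk, pow_compose_alt, dif_pos (by omega)]
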